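-- pv_equiv track=rewrite | github.com/empoweringit/password_manager | utils/password_utils.py | get_password_recommendations
-- ===== SOURCE A (Python) =====
-- def get_password_recommendations(password, settings):
--     """Get recommendations for improving password strength."""
--     recommendations = []
--
--     if len(password) < 12:
--         recommendations.append("Increase password length to at least 12 characters")
--
--     if not any(c.isupper() for c in password) and settings.get('use_upper', True):
--         recommendations.append("Include uppercase letters")
--
--     if not any(c.islower() for c in password) and settings.get('use_lower', True):
--         recommendations.append("Include lowercase letters")
--
--     if not any(c.isdigit() for c in password) and settings.get('use_digits', True):
--         recommendations.append("Include numbers")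
--
--     if not any(not c.isalnum() for c in password) and settings.get('use_punctuation', True):
--         recommendations.append("Include special characters")
--
--     return recommendations
-- ===== SOURCE B (Python) =====
-- def get_password_recommendations(password, settings):
--     """Get recommendations for improving password strength."""
--     has_upper = has_lower = has_digit = has_special = False
--     for c in password:
--         if c.isupper():
--             has_upper = True
--         if c.islower():
--             has_lower = True
--         if c.isdigit():
--             has_digit = True
--         if not c.isalnum():
--             has_special = True
--
--     checks = [
--         (has_upper, 'use_upper', "Include uppercase letters"),
--         (has_lower, 'use_lower', "Include lowercase letters"),
--         (has_digit, 'use_digits', "Include numbers"),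
--         (has_special, 'use_punctuation', "Include special characters"),
--     ]
--     head = ["Increase password length to at least 12 characters"] if len(password) < 12 else []
--     return head + [msg for present, key, msg in checks
--                    if not present and settings.get(key, True)]
-- ===== Notes on version B (the rewrite author's own statement) =====
-- stated objective: alternative
-- what changed: Replaces A's four separate any() generator scans over the password with one explicit pass accumulating four flags, and replaces the four append-ifs with a table of (flag, setting key, message) triples consumed by a single comprehension.
import Mathlib
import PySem

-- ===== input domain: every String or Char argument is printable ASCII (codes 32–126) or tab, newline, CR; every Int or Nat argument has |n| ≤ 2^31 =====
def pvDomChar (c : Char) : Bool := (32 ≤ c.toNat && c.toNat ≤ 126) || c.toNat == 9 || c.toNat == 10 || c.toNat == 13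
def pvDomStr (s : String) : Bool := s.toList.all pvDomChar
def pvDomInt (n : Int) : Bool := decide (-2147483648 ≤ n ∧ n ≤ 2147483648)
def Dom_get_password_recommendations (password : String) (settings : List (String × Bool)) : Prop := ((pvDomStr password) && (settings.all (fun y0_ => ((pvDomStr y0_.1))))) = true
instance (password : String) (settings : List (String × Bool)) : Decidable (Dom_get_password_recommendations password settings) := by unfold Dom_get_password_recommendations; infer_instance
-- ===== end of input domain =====

-- B replaces A's four separate any() scans by one pass accumulating four flags and a
-- table-driven comprehension building the messages (objective: alternative decomposition).

-- ===== PORT A =====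
-- settings.get(k, True) on the dict-as-association-list: first match, default True
def pvSettingsGet (settings : List (String × Bool)) (k : String) : Bool :=
  (settings.lookup k).getD true

def get_password_recommendations (password : String) (settings : List (String × Bool)) : List String :=
  let cs := password.toList
  let recs : List String := []
  let recs := if PySem.Str.len password < 12 then
      recs ++ ["Increase password length to at least 12 characters"] else recs
  let recs := if (!(cs.any PySem.Chars.isupper)) && pvSettingsGet settings "use_upper" then
      recs ++ ["Include uppercase letters"] else recs
  let recs := if (!(cs.any PySem.Chars.islower)) && pvSettingsGet settings "use_lower" then
      recs ++ ["Include lowercase letters"] else recs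
  let recs := if (!(cs.any PySem.Chars.isdigit)) && pvSettingsGet settings "use_digits" then
      recs ++ ["Include numbers"] else recs
  let recs := if (!(cs.any (fun c => !PySem.Chars.isalnum c))) && pvSettingsGet settings "use_punctuation" then
      recs ++ ["Include special characters"] else recs
  recs

-- ===== PORT B =====
-- the single pass of Source B: four flags updated per character
def pvFlagsStep (st : Bool × Bool × Bool × Bool) (c : Char) : Bool × Bool × Bool × Bool :=
  let st := if PySem.Chars.isupper c then (true, st.2) else st
  let st := if PySem.Chars.islower c then (st.1, true, st.2.2) else st
  let st := if PySem.Chars.isdigit c then (st.1, st.2.1, true, st.2.2.2) else st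
  let st := if !PySem.Chars.isalnum c then (st.1, st.2.1, st.2.2.1, true) else st
  st

def get_password_recommendations_alt (password : String) (settings : List (String × Bool)) : List String :=
  let f := password.toList.foldl pvFlagsStep (false, false, false, false)
  let checks : List (Bool × String × String) :=
    [ (f.1,     "use_upper",       "Include uppercase letters"),
      (f.2.1,   "use_lower",       "Include lowercase letters"),
      (f.2.2.1, "use_digits",      "Include numbers"),
      (f.2.2.2, "use_punctuation", "Include special characters") ]
  let head := if PySem.Str.len password < 12 then
      ["Increase password length to at least 12 characters"] else []
  head ++ checks.filterMap (fun t =>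
    if (!t.1) && (settings.lookup t.2.1).getD true then some t.2.2 else none)

-- ===== PRECONDITION & SPEC =====
def Spec_get_password_recommendations (password : String) (settings : List (String × Bool)) (out : List String) : Prop := out = get_password_recommendations_alt password settings
instance (password : String) (settings : List (String × Bool)) (out : List String) : Decidable (Spec_get_password_recommendations password settings out) := by unfold Spec_get_password_recommendations; infer_instance

-- ===== CLAIM (what is proved, stated in full; the proofs are below) =====
def Claim_equal_get_password_recommendations : Prop := ∀ (password : String) (settings : List (String × Bool)), Dom_get_password_recommendations password settings → Spec_get_password_recommendations password settings (get_password_recommendations password settings)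

-- ===== LEMMAS AND PROOFS =====
-- one step of the fold or-s the four per-character tests into the flags
theorem pvFlagsStep_eq (st : Bool × Bool × Bool × Bool) (c : Char) :
    pvFlagsStep st c =
      (st.1 || PySem.Chars.isupper c, st.2.1 || PySem.Chars.islower c,
       st.2.2.1 || PySem.Chars.isdigit c, st.2.2.2 || !PySem.Chars.isalnum c) := by
  obtain ⟨a, b, c', d⟩ := st
  unfold pvFlagsStep
  cases hu : PySem.Chars.isupper c <;> cases hl : PySem.Chars.islower c <;>
    cases hd : PySem.Chars.isdigit c <;> cases ha : PySem.Chars.isalnum c <;> simp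

-- the fold computes the four any-scans at once
theorem pvFlags_eq (cs : List Char) (a b c d : Bool) :
    cs.foldl pvFlagsStep (a, b, c, d) =
      (a || cs.any PySem.Chars.isupper,
       b || cs.any PySem.Chars.islower,
       c || cs.any PySem.Chars.isdigit,
       d || cs.any (fun x => !PySem.Chars.isalnum x)) := by
  induction cs generalizing a b c d with
  | nil => simp
  | cons x xs ih =>
    simp only [List.foldl_cons, List.any_cons, pvFlagsStep_eq, ih, Bool.or_assoc]

-- ===== VERDICT (by name: the statement is the Claim_ definition above) =====
theorem get_password_recommendations_spec : Claim_equal_get_password_recommendations := by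
  intro password settings _
  unfold Spec_get_password_recommendations get_password_recommendations get_password_recommendations_alt
  simp only [pvFlags_eq, Bool.false_or, List.filterMap, pvSettingsGet]
  split_ifs <;> simp_all
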